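-- pv_equiv track=rewrite | github.com/Seonggyu-Bae/APS | 23_08_03/test.py | special_sort
-- ===== SOURCE A (Python) =====
-- def special_sort(arr_len, my_arr):
--     for i in range(arr_len):
--         if i % 2 == 0:
--             max_idx = i
--             for j in range(i + 1, arr_len):
--                 if my_arr[max_idx] < my_arr[j]:
--                     max_idx = j
--             my_arr[i], my_arr[max_idx] = my_arr[max_idx], my_arr[i]
--         else:
--             min_idx = i
--             for j in range(i + 1, arr_len):
--                 if my_arr[min_idx] > my_arr[j]:
--                     min_idx = j
--             my_arr[i], my_arr[min_idx] = my_arr[min_idx], my_arr[i]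
--     return my_arr
-- ===== SOURCE B (Python) =====
-- def special_sort(arr_len, my_arr):
--     # Sort the first arr_len elements once, then read alternately from the
--     # largest and smallest ends.  Mutates my_arr's prefix like A does (by value).
--     n = max(arr_len, 0)
--     s = sorted(my_arr[:n])
--     out = []
--     lo, hi = 0, n - 1
--     for i in range(n):
--         if i % 2 == 0:
--             out.append(s[hi])
--             hi -= 1
--         else:
--             out.append(s[lo])
--             lo += 1
--     my_arr[:n] = out
--     return my_arr
-- ===== Notes on version B (the rewrite author's own statement) =====
-- stated objective: faster
-- what changed: Replaced the alternating max/min selection sort (nested scans with in-place swaps) by sorting the prefix once and reading the result alternately from the largest and smallest ends with two pointers.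
import Mathlib
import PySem

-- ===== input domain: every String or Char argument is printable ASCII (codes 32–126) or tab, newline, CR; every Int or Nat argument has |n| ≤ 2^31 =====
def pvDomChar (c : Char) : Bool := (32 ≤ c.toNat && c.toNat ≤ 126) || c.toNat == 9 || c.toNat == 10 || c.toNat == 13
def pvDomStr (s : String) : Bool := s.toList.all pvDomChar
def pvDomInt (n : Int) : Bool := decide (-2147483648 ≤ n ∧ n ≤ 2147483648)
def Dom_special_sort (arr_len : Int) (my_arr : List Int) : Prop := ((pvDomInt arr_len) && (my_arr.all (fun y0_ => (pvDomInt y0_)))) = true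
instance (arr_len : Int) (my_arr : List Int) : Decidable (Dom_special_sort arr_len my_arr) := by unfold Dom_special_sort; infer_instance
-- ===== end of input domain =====

-- B sorts the first arr_len elements once and reads them alternately from the largest
-- and smallest ends (O(n log n)) instead of A's alternating max/min selection sort (O(n^2)).
-- Both Pythons mutate my_arr's prefix identically; the equivalence proved is about the return value.


-- ===== PORT A =====
-- my_arr[i]: exact whenever the index is in range, which Pre_special_sort guarantees
def pyget (arr : List Int) (i : Int) : Int := (PySem.List.pyGet? arr i).getD 0

-- `for j in range(i+1, arr_len): if my_arr[max_idx] < my_arr[j]: max_idx = j`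
def maxIdxLoop (arr : List Int) (idx j : Int) : Nat → Int
  | 0 => idx
  | f + 1 => maxIdxLoop arr (if pyget arr idx < pyget arr j then j else idx) (j + 1) f

-- `for j in range(i+1, arr_len): if my_arr[min_idx] > my_arr[j]: min_idx = j`
def minIdxLoop (arr : List Int) (idx j : Int) : Nat → Int
  | 0 => idx
  | f + 1 => minIdxLoop arr (if pyget arr j < pyget arr idx then j else idx) (j + 1) f

-- `my_arr[i], my_arr[k] = my_arr[k], my_arr[i]` (RHS evaluated first, then assigned left to right)
def swapAt (arr : List Int) (i k : Int) : List Int :=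
  let a := pyget arr i
  let b := pyget arr k
  PySem.List.pySetD (PySem.List.pySetD arr i b) k a

-- `for i in range(arr_len): …` with the two selection branches
def outerLoop (n : Int) : Int → Nat → List Int → List Int
  | _, 0, arr => arr
  | i, f + 1, arr =>
    let arr' :=
      if PySem.Int.mod i 2 == 0 then
        swapAt arr i (maxIdxLoop arr i (i + 1) (n - (i + 1)).toNat)
      else
        swapAt arr i (minIdxLoop arr i (i + 1) (n - (i + 1)).toNat)
    outerLoop n (i + 1) f arr'

def special_sort (arr_len : Int) (my_arr : List Int) : List Int :=
  outerLoop arr_len 0 arr_len.toNat my_arr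

-- ===== PORT B =====
-- `for i in range(n): if i % 2 == 0: out.append(s[hi]); hi -= 1 else: out.append(s[lo]); lo += 1`
def altLoop (s : List Int) : Int → Int → Int → Nat → List Int → List Int
  | _, _, _, 0, out => out
  | lo, hi, i, f + 1, out =>
    if PySem.Int.mod i 2 == 0 then
      altLoop s lo (hi - 1) (i + 1) f (out ++ [pyget s hi])
    else
      altLoop s (lo + 1) hi (i + 1) f (out ++ [pyget s lo])

def special_sort_alt (arr_len : Int) (my_arr : List Int) : List Int :=
  let n : Int := max arr_len 0
  let s := PySem.List.sorted (PySem.List.slice my_arr none (some n)) (fun x => x) false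
  let out := altLoop s 0 (n - 1) 0 n.toNat []
  -- `my_arr[:n] = out; return my_arr`
  out ++ PySem.List.slice my_arr (some n) none

-- ===== PRECONDITION & SPEC =====
-- Pre_ excludes exactly the inputs where A raises IndexError: arr_len larger than the list length.
def Pre_special_sort (arr_len : Int) (my_arr : List Int) : Prop := arr_len ≤ (my_arr.length : Int)
instance (arr_len : Int) (my_arr : List Int) : Decidable (Pre_special_sort arr_len my_arr) := by unfold Pre_special_sort; infer_instance
def pvWitness_special_sort : Int × List Int := (4, [3, 1, 2, 1])

def Spec_special_sort (arr_len : Int) (my_arr : List Int) (out : List Int) : Prop := out = special_sort_alt arr_len my_arr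
instance (arr_len : Int) (my_arr : List Int) (out : List Int) : Decidable (Spec_special_sort arr_len my_arr out) := by unfold Spec_special_sort; infer_instance

-- ===== CLAIM (what is proved, stated in full; the proofs are below) =====
def Claim_equal_special_sort : Prop := ∀ (arr_len : Int) (my_arr : List Int), Dom_special_sort arr_len my_arr → Pre_special_sort arr_len my_arr → Spec_special_sort arr_len my_arr (special_sort arr_len my_arr)

-- ===== LEMMAS AND PROOFS =====

-- The common value both programs compute on the length-n prefix: alternately the
-- largest / smallest remaining element of a sorted list.
def altP : Bool → List Int → List Int
  | _, [] => []
  | true, x :: t => (x :: t).getLastD 0 :: altP false (x :: t).dropLast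
  | false, x :: t => x :: altP true t
  termination_by _ s => s.length
  decreasing_by all_goals simp

lemma altP_true (s : List Int) (h : s ≠ []) :
    altP true s = s.getLastD 0 :: altP false s.dropLast := by
  cases s with
  | nil => exact absurd rfl h
  | cons x t => simp [altP]

-- `maxIdxLoop` returns an index in [min idx j, j+f) whose value bounds arr[idx] and all arr[p], j ≤ p < j+f.
lemma maxIdxLoop_spec (arr : List Int) : ∀ (f : Nat) (idx j : Int),
    (maxIdxLoop arr idx j f = idx ∨ (j ≤ maxIdxLoop arr idx j f ∧ maxIdxLoop arr idx j f < j + f)) ∧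
    pyget arr idx ≤ pyget arr (maxIdxLoop arr idx j f) ∧
    ∀ p : Int, j ≤ p → p < j + f → pyget arr p ≤ pyget arr (maxIdxLoop arr idx j f) := by
  intro f
  induction f with
  | zero => intro idx j; refine ⟨Or.inl rfl, le_refl _, ?_⟩; intro p h1 h2; omega
  | succ f ih =>
    intro idx j
    simp only [maxIdxLoop]
    set idx' := if pyget arr idx < pyget arr j then j else idx with hidx'
    obtain ⟨hpos, hle, hall⟩ := ih idx' (j + 1)
    have hidxle : pyget arr idx ≤ pyget arr idx' := by
      by_cases h : pyget arr idx < pyget arr j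
      · simp only [hidx', if_pos h]; omega
      · simp only [hidx', if_neg h]; exact le_refl _
    have hjle : pyget arr j ≤ pyget arr idx' := by
      by_cases h : pyget arr idx < pyget arr j
      · simp only [hidx', if_pos h]; exact le_refl _
      · simp only [hidx', if_neg h]; omega
    refine ⟨?_, le_trans hidxle hle, ?_⟩
    · rcases hpos with h | h
      · rw [h]
        by_cases hc : pyget arr idx < pyget arr j
        · right; simp only [hidx', if_pos hc]; push_cast; omega
        · left; simp only [hidx', if_neg hc]
      · right; push_cast at h ⊢; omega
    · intro p h1 h2
      by_cases hp : p = j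
      · subst hp; exact le_trans hjle hle
      · exact hall p (by omega) (by push_cast at h2 ⊢; omega)

lemma minIdxLoop_spec (arr : List Int) : ∀ (f : Nat) (idx j : Int),
    (minIdxLoop arr idx j f = idx ∨ (j ≤ minIdxLoop arr idx j f ∧ minIdxLoop arr idx j f < j + f)) ∧
    pyget arr (minIdxLoop arr idx j f) ≤ pyget arr idx ∧
    ∀ p : Int, j ≤ p → p < j + f → pyget arr (minIdxLoop arr idx j f) ≤ pyget arr p := by
  intro f
  induction f with
  | zero => intro idx j; refine ⟨Or.inl rfl, le_refl _, ?_⟩; intro p h1 h2; omega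
  | succ f ih =>
    intro idx j
    simp only [minIdxLoop]
    set idx' := if pyget arr j < pyget arr idx then j else idx with hidx'
    obtain ⟨hpos, hle, hall⟩ := ih idx' (j + 1)
    have hidxle : pyget arr idx' ≤ pyget arr idx := by
      by_cases h : pyget arr j < pyget arr idx
      · simp only [hidx', if_pos h]; omega
      · simp only [hidx', if_neg h]; exact le_refl _
    have hjle : pyget arr idx' ≤ pyget arr j := by
      by_cases h : pyget arr j < pyget arr idx
      · simp only [hidx', if_pos h]; exact le_refl _
      · simp only [hidx', if_neg h]; omega
    refine ⟨?_, le_trans hle hidxle, ?_⟩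
    · rcases hpos with h | h
      · rw [h]
        by_cases hc : pyget arr j < pyget arr idx
        · right; simp only [hidx', if_pos hc]; push_cast; omega
        · left; simp only [hidx', if_neg hc]
      · right; push_cast at h ⊢; omega
    · intro p h1 h2
      by_cases hp : p = j
      · subst hp; exact le_trans hle hjle
      · exact hall p (by omega) (by push_cast at h2 ⊢; omega)

lemma pyget_middle (pre r post : List Int) (m : Nat) (hm : m < r.length) :
    pyget (pre ++ r ++ post) ((pre.length : Int) + (m : Int)) = r[m] := by
  rw [pyget, List.append_assoc, PySem.List.pyGet?_append_right]
  rw [List.getElem?_append_left hm, List.getElem?_eq_getElem hm]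
  rfl

-- Swapping positions pre.length and pre.length+m puts r[m] first and permutes the block.
lemma swapAt_decomp (pre r post : List Int) (m : Nat) (hm : m < r.length) :
    ∃ rest : List Int,
      swapAt (pre ++ r ++ post) (pre.length : Int) ((pre.length : Int) + (m : Int))
        = pre ++ (r[m] :: rest) ++ post ∧
      rest.length + 1 = r.length ∧ (r[m] :: rest).Perm r := by
  have hr0 : 0 < r.length := by omega
  have ha : pyget (pre ++ r ++ post) ((pre.length : Int)) = r[0] := by
    have := pyget_middle pre r post 0 hr0; simpa using this
  have hb := pyget_middle pre r post m hm
  rw [swapAt, ha, hb]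
  rw [PySem.List.pySetD_of_nonneg _ _ (by positivity),
      PySem.List.pySetD_of_nonneg _ _ (by positivity)]
  have h1 : ((pre.length : Int)).toNat = pre.length := by omega
  have h2 : ((pre.length : Int) + (m : Int)).toNat = pre.length + m := by omega
  rw [h1, h2, List.append_assoc, List.set_append, if_neg (by omega), Nat.sub_self,
      List.set_append, if_neg (by omega), Nat.add_sub_cancel_left]
  obtain ⟨x, t, rfl⟩ : ∃ x t, r = x :: t := by
    cases r with
    | nil => simp at hr0
    | cons x t => exact ⟨x, t, rfl⟩
  cases m with
  | zero =>
    refine ⟨t, by simp, by simp, by simp⟩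
  | succ j =>
    have hj : j < t.length := by simpa using hm
    refine ⟨t.set j x, ?_, by simp, ?_⟩
    · simp [hj]
    · -- (t[j] :: t.set j x).Perm (x :: t)
      have hset : t.set j x = t.take j ++ x :: t.drop (j + 1) := by
        rw [List.set_eq_take_append_cons_drop, if_pos hj]
      have ht : t = t.take j ++ t[j] :: t.drop (j + 1) := by
        conv_lhs => rw [← List.take_append_drop j t, List.drop_eq_getElem_cons hj]
      have hgetr : (x :: t)[j + 1] = t[j] := by simp
      have p1 : (t[j] :: (t.take j ++ x :: t.drop (j + 1))).Perm
          (x :: (t.take j ++ t[j] :: t.drop (j + 1))) :=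
        (List.Perm.cons _ List.perm_middle).trans
          ((List.Perm.swap _ _ _).trans (List.Perm.cons _ List.perm_middle.symm))
      rw [hgetr, hset]
      conv_rhs => rw [ht]
      exact p1

-- The largest element of r is the last of sorted(r); removing it sorts to dropLast.
lemma sorted_max_decomp (r : List Int) (b : Int) (hb : b ∈ r) (hmax : ∀ x ∈ r, x ≤ b) :
    PySem.List.sorted r (fun x => x) false
      = (PySem.List.sorted r (fun x => x) false).dropLast ++ [b] := by
  set s := PySem.List.sorted r (fun x => x) false with hs
  have hsne : s ≠ [] := by
    rw [hs, Ne, PySem.List.sorted_eq_nil_iff]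
    rintro rfl; simp at hb
  have hlast : s.getLast hsne = b := by
    have h1 : s.getLast hsne ≤ b := hmax _ (by
      rw [← PySem.List.mem_sorted r (fun x => x) false, ← hs]
      exact List.getLast_mem hsne)
    have h2 : b ≤ s.getLast hsne := by
      have hbs : b ∈ s := by rw [hs, PySem.List.mem_sorted]; exact hb
      have hp : s.Pairwise (fun a b => a ≤ b) := by
        simpa using PySem.List.sorted_pairwise r (fun x => x)
      rw [← List.dropLast_append_getLast hsne, List.pairwise_append] at hp
      have hbs' : b ∈ s.dropLast ++ [s.getLast hsne] := by
        rw [List.dropLast_append_getLast hsne]; exact hbs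
      rcases List.mem_append.mp hbs' with h | h
      · exact hp.2.2 b h _ (by simp)
      · simp at h; omega
    omega
  conv_lhs => rw [← List.dropLast_append_getLast hsne, hlast]

lemma sorted_rest_max (r rest : List Int) (b : Int)
    (hperm : (b :: rest).Perm r) (hmax : ∀ x ∈ r, x ≤ b) :
    PySem.List.sorted rest (fun x => x) false
      = (PySem.List.sorted r (fun x => x) false).dropLast := by
  set s := PySem.List.sorted r (fun x => x) false with hs
  have hb : b ∈ r := hperm.mem_iff.mp (by simp)
  have hdecomp := sorted_max_decomp r b hb hmax
  rw [← hs] at hdecomp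
  have hsr : s.Perm r := PySem.List.sorted_perm r (fun x => x) false
  have hperm2 : (b :: s.dropLast).Perm (b :: rest) := by
    have h1 : (b :: s.dropLast).Perm s := by
      have := (List.perm_append_singleton b s.dropLast).symm
      rwa [← hdecomp] at this
    exact (h1.trans hsr).trans hperm.symm
  have hpw : s.dropLast.Pairwise (fun a b : Int => a ≤ b) := by
    have hp : s.Pairwise (fun a b : Int => a ≤ b) := by
      simpa using PySem.List.sorted_pairwise r (fun x => x)
    exact hp.sublist (List.dropLast_sublist _)
  exact PySem.List.sorted_id_eq_of_perm_of_pairwise _ _ hperm2.cons_inv hpw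

-- The smallest element of r heads sorted(r); removing it sorts to the tail.
lemma sorted_rest_min (r rest : List Int) (b : Int)
    (hperm : (b :: rest).Perm r) (hmin : ∀ x ∈ r, b ≤ x) :
    PySem.List.sorted r (fun x => x) false = b :: PySem.List.sorted rest (fun x => x) false := by
  set s := PySem.List.sorted r (fun x => x) false with hs
  have hsr : s.Perm r := PySem.List.sorted_perm r (fun x => x) false
  have hb : b ∈ r := hperm.mem_iff.mp (by simp)
  obtain ⟨h, t, hst⟩ : ∃ h t, s = h :: t := by
    cases hcs : s with
    | nil =>
      rw [hs, PySem.List.sorted_eq_nil_iff] at hcs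
      subst hcs; simp at hb
    | cons h t => exact ⟨h, t, rfl⟩
  have hhb : h = b := by
    have h1 : b ≤ h := hmin _ (by
      have : h ∈ s := by rw [hst]; simp
      exact hsr.mem_iff.mp this)
    have h2 : h ≤ b := by
      have := PySem.List.key_head_sorted_le r (fun x => x) (m := h) (t := t) (by rw [← hs, hst])
      exact this b hb
    omega
  have htrest : PySem.List.sorted rest (fun x => x) false = t := by
    have hperm2 : (b :: t).Perm (b :: rest) := by
      have h1 : (b :: t) = s := by rw [← hhb, hst]
      rw [h1]
      exact hsr.trans hperm.symm
    have hpw : t.Pairwise (fun a b : Int => a ≤ b) := by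
      have hp : s.Pairwise (fun a b : Int => a ≤ b) := by
        simpa using PySem.List.sorted_pairwise r (fun x => x)
      rw [hst] at hp
      exact hp.of_cons
    exact PySem.List.sorted_id_eq_of_perm_of_pairwise _ _ hperm2.cons_inv hpw
  rw [htrest, hst, hhb]

-- Parity bookkeeping for `i % 2 == 0` along i+1.
lemma mod_two_flip (i : Int) :
    (PySem.Int.mod (i + 1) 2 == 0) = !(PySem.Int.mod i 2 == 0) := by
  rw [PySem.Int.mod_eq_emod_of_pos (by omega), PySem.Int.mod_eq_emod_of_pos (by omega)]
  rcases Int.emod_two_eq i with h | h <;>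
    simp [h] <;> omega

-- ===== MAIN LEMMA, A SIDE =====
lemma outer_eq (n : Int) : ∀ (f : Nat) (pre r post : List Int),
    r.length = f → n = (pre.length : Int) + (f : Int) →
    outerLoop n (pre.length : Int) f (pre ++ r ++ post)
      = pre ++ altP (PySem.Int.mod (pre.length : Int) 2 == 0)
          (PySem.List.sorted r (fun x => x) false) ++ post := by
  intro f
  induction f with
  | zero =>
    intro pre r post hr hn
    have hrnil : r = [] := List.eq_nil_of_length_eq_zero hr
    subst hrnil
    have hnil : PySem.List.sorted ([] : List Int) (fun x => x) false = [] :=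
      (PySem.List.sorted_eq_nil_iff _ _ _).mpr rfl
    rw [hnil]
    cases hc : (PySem.Int.mod (pre.length : Int) 2 == 0) <;> simp [outerLoop, altP]
  | succ f ih =>
    intro pre r post hr hn
    have hr0 : 0 < r.length := by omega
    have hfuel : (n - ((pre.length : Int) + 1)).toNat = f := by omega
    rw [outerLoop, hfuel]
    by_cases hpar : (PySem.Int.mod (pre.length : Int) 2 == 0) = true
    · -- even step: select the max
      rw [if_pos hpar]
      obtain ⟨hpos, hle, hall⟩ :=
        maxIdxLoop_spec (pre ++ r ++ post) f (pre.length : Int) ((pre.length : Int) + 1)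
      set k := maxIdxLoop (pre ++ r ++ post) (pre.length : Int) ((pre.length : Int) + 1) f with hk
      have hkrange : (pre.length : Int) ≤ k ∧ k < (pre.length : Int) + 1 + f := by
        rcases hpos with h | h
        · constructor; omega; rw [h]; push_cast; omega
        · constructor <;> omega
      set m : Nat := (k - (pre.length : Int)).toNat with hmdef
      have hkm : k = (pre.length : Int) + (m : Int) := by omega
      have hm : m < r.length := by omega
      have hbval : pyget (pre ++ r ++ post) k = r[m] := by
        rw [hkm]; exact pyget_middle pre r post m hm
      have hmax : ∀ x ∈ r, x ≤ r[m] := by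
        intro x hx
        obtain ⟨q, hq, rfl⟩ := List.getElem_of_mem hx
        rw [← hbval]
        rcases Nat.eq_zero_or_pos q with hq0 | hq0
        · subst hq0
          have := pyget_middle pre r post 0 (by omega)
          rw [← this]; simpa using hle
        · have := pyget_middle pre r post q hq
          rw [← this]
          exact hall _ (by omega) (by push_cast; omega)
      obtain ⟨rest, hswap, hlen, hperm⟩ := swapAt_decomp pre r post m hm
      rw [hkm, hswap]
      have harr' : pre ++ (r[m] :: rest) ++ post = (pre ++ [r[m]]) ++ rest ++ post := by
        simp
      rw [harr']
      have hlen' : ((pre ++ [r[m]]).length : Int) = (pre.length : Int) + 1 := by simp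
      have := ih (pre ++ [r[m]]) rest post (by omega) (by rw [hlen']; push_cast; omega)
      rw [hlen'] at this
      rw [this, mod_two_flip, hpar]
      have hsrest := sorted_rest_max r rest r[m] hperm hmax
      rw [hsrest]
      have hsne : PySem.List.sorted r (fun x => x) false ≠ [] := by
        rw [Ne, PySem.List.sorted_eq_nil_iff]
        intro h; rw [h] at hr0; simp at hr0
      rw [altP_true _ hsne]
      have hlastval : (PySem.List.sorted r (fun x => x) false).getLastD 0 = r[m] := by
        have hb : r[m] ∈ r := List.getElem_mem hm
        rw [sorted_max_decomp r r[m] hb hmax, List.getLastD_concat]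
      rw [hlastval]
      simp
    · -- odd step: select the min
      rw [if_neg hpar]
      obtain ⟨hpos, hle, hall⟩ :=
        minIdxLoop_spec (pre ++ r ++ post) f (pre.length : Int) ((pre.length : Int) + 1)
      set k := minIdxLoop (pre ++ r ++ post) (pre.length : Int) ((pre.length : Int) + 1) f with hk
      have hkrange : (pre.length : Int) ≤ k ∧ k < (pre.length : Int) + 1 + f := by
        rcases hpos with h | h
        · constructor; omega; rw [h]; push_cast; omega
        · constructor <;> omega
      set m : Nat := (k - (pre.length : Int)).toNat with hmdef
      have hkm : k = (pre.length : Int) + (m : Int) := by omega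
      have hm : m < r.length := by omega
      have hbval : pyget (pre ++ r ++ post) k = r[m] := by
        rw [hkm]; exact pyget_middle pre r post m hm
      have hmin : ∀ x ∈ r, r[m] ≤ x := by
        intro x hx
        obtain ⟨q, hq, rfl⟩ := List.getElem_of_mem hx
        rw [← hbval]
        rcases Nat.eq_zero_or_pos q with hq0 | hq0
        · subst hq0
          have := pyget_middle pre r post 0 (by omega)
          rw [← this]; simpa using hle
        · have := pyget_middle pre r post q hq
          rw [← this]
          exact hall _ (by omega) (by push_cast; omega)
      obtain ⟨rest, hswap, hlen, hperm⟩ := swapAt_decomp pre r post m hm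
      rw [hkm, hswap]
      have harr' : pre ++ (r[m] :: rest) ++ post = (pre ++ [r[m]]) ++ rest ++ post := by
        simp
      rw [harr']
      have hlen' : ((pre ++ [r[m]]).length : Int) = (pre.length : Int) + 1 := by simp
      have := ih (pre ++ [r[m]]) rest post (by omega) (by rw [hlen']; push_cast; omega)
      rw [hlen'] at this
      rw [this, mod_two_flip]
      rw [Bool.not_eq_true] at hpar
      rw [hpar]
      rw [sorted_rest_min r rest r[m] hperm hmin]
      simp [altP]

-- ===== MAIN LEMMA, B SIDE =====
lemma altP_false (x : Int) (t : List Int) : altP false (x :: t) = x :: altP true t := by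
  simp [altP]

lemma altLoop_eq (s : List Int) : ∀ (f : Nat) (lo i : Int) (out : List Int),
    0 ≤ lo → lo.toNat + f ≤ s.length →
    altLoop s lo (lo + f - 1) i f out
      = out ++ altP (PySem.Int.mod i 2 == 0) ((s.drop lo.toNat).take f) := by
  intro f
  induction f with
  | zero =>
    intro lo i out hlo hlen
    cases hc : (PySem.Int.mod i 2 == 0) <;> simp [altLoop, altP]
  | succ f ih =>
    intro lo i out hlo hlen
    have hfd : f < (s.drop lo.toNat).length := by simp; omega
    rw [altLoop]
    by_cases hpar : (PySem.Int.mod i 2 == 0) = true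
    · rw [if_pos hpar]
      have hx : pyget s (lo + ((f + 1 : Nat) : Int) - 1) = (s.drop lo.toNat)[f] := by
        rw [pyget, show lo + ((f + 1 : Nat) : Int) - 1 = lo + (f : Int) by push_cast; omega,
            PySem.List.pyGet?_of_nonneg _ (by omega),
            show (lo + (f : Int)).toNat = lo.toNat + f by omega,
            List.getElem?_eq_getElem (by omega)]
        simp
      rw [hx, show lo + ((f + 1 : Nat) : Int) - 1 - 1 = lo + (f : Int) - 1 by push_cast; omega,
          ih lo (i + 1) _ hlo (by omega), mod_two_flip, hpar]
      have htake : (s.drop lo.toNat).take (f + 1)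
          = (s.drop lo.toNat).take f ++ [(s.drop lo.toNat)[f]] := by
        rw [List.take_succ, List.getElem?_eq_getElem hfd]; simp
      rw [htake, altP_true _ (by simp), List.getLastD_concat, List.dropLast_concat]
      simp
    · rw [if_neg hpar]
      have hparf : (PySem.Int.mod i 2 == 0) = false := by simpa using hpar
      have hlt : lo.toNat < s.length := by omega
      have hy : pyget s lo = s[lo.toNat] := by
        rw [pyget, PySem.List.pyGet?_of_nonneg _ hlo, List.getElem?_eq_getElem hlt]
        rfl
      rw [hy, show lo + ((f + 1 : Nat) : Int) - 1 = (lo + 1) + (f : Int) - 1 by push_cast; omega,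
          ih (lo + 1) (i + 1) _ (by omega) (by omega), mod_two_flip, hparf]
      have hstep : (s.drop lo.toNat).take (f + 1)
          = s[lo.toNat] :: (s.drop ((lo + 1).toNat)).take f := by
        rw [show (lo + 1).toNat = lo.toNat + 1 by omega]
        conv_lhs => rw [List.drop_eq_getElem_cons hlt]
        rfl
      rw [hstep, altP_false]
      simp

-- ===== FINAL ASSEMBLY =====
lemma special_sort_alt_eq (arr_len : Int) (my_arr : List Int)
    (hpre : arr_len ≤ (my_arr.length : Int)) :
    special_sort_alt arr_len my_arr
      = altP true (PySem.List.sorted (my_arr.take arr_len.toNat) (fun x => x) false)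
          ++ my_arr.drop arr_len.toNat := by
  rcases le_or_gt arr_len 0 with hle | hpos
  · have h0 : arr_len.toNat = 0 := by omega
    rw [special_sort_alt]
    have hmax : max arr_len 0 = 0 := by omega
    rw [hmax, h0]
    have hs0 : PySem.List.slice my_arr none (some 0) = my_arr.take 0 := by
      have := PySem.List.slice_to_natCast my_arr 0
      simpa using this
    have hs1 : PySem.List.slice my_arr (some 0) none = my_arr.drop 0 := by
      have := PySem.List.slice_from_natCast my_arr 0
      simpa using this
    rw [hs0, hs1]
    simp [altLoop, altP, PySem.List.sorted]
  · have hmax : max arr_len 0 = arr_len := by omega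
    rw [special_sort_alt, hmax]
    have hcast : arr_len = ((arr_len.toNat : Nat) : Int) := by omega
    have hs0 : PySem.List.slice my_arr none (some arr_len) = my_arr.take arr_len.toNat := by
      rw [hcast]; exact PySem.List.slice_to_natCast my_arr arr_len.toNat
    have hs1 : PySem.List.slice my_arr (some arr_len) none = my_arr.drop arr_len.toNat := by
      rw [hcast]; exact PySem.List.slice_from_natCast my_arr arr_len.toNat
    rw [hs0, hs1]
    set sl := PySem.List.sorted (my_arr.take arr_len.toNat) (fun x => x) false with hsl
    have hlens : sl.length = arr_len.toNat := by
      rw [hsl, PySem.List.length_sorted, List.length_take]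
      omega
    have h01 : arr_len - 1 = (0 : Int) + (arr_len.toNat : Int) - 1 := by omega
    rw [h01]
    have := altLoop_eq sl arr_len.toNat 0 0 [] (by omega) (by omega)
    rw [this]
    have hmod : (PySem.Int.mod 0 2 == 0) = true := by decide
    rw [hmod]
    have htk : sl.take arr_len.toNat = sl := List.take_of_length_le (by omega)
    simp [htk]

-- ===== VERDICT (by name: the statement is the Claim_ definition above) =====
theorem special_sort_spec : Claim_equal_special_sort := by
  intro arr_len my_arr _ hpre
  unfold Pre_special_sort at hpre
  unfold Spec_special_sort
  rw [special_sort_alt_eq arr_len my_arr hpre]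
  rcases le_or_gt arr_len 0 with hle | hpos
  · have h0 : arr_len.toNat = 0 := by omega
    rw [special_sort, h0]
    simp [outerLoop, altP, PySem.List.sorted]
  · have hsplit : my_arr = [] ++ my_arr.take arr_len.toNat ++ my_arr.drop arr_len.toNat := by
      simp
    rw [special_sort]
    conv_lhs => rw [hsplit]
    have hlen : (my_arr.take arr_len.toNat).length = arr_len.toNat := by
      simp; omega
    have h0 : (0 : Int) = (([] : List Int).length : Int) := by simp
    rw [h0]
    rw [outer_eq arr_len arr_len.toNat [] (my_arr.take arr_len.toNat) (my_arr.drop arr_len.toNat) hlen (by simp; omega)]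
    have hmod : (PySem.Int.mod ((([] : List Int).length : Nat) : Int) 2 == 0) = true := by decide
    simp only [List.length_nil, Nat.cast_zero] at *
    have hmod0 : (PySem.Int.mod 0 2 == 0) = true := by decide
    rw [hmod0]
    simp
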